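-- pv_equiv track=rewrite | github.com/Tradinator1/CoinSenseAI1 | ai_crypto_portfolio_assistant/backend/main.py | resolve_symbol_to_id
-- ===== SOURCE A (Python) =====
-- from typing import Dict, List, Tuple, Any, Optional
--
-- _MANUAL_OVERRIDES = {
--     "BTC": "bitcoin",
--     "ETH": "ethereum",
--     "SOL": "solana",
--     "LINK": "chainlink",
--     "ALGO": "algorand",
--     "SUI": "sui",
--     "ADA": "cardano",
--     "DOGE": "dogecoin",
--     "XRP": "ripple",
--     "LTC": "litecoin",
--     "DOT": "polkadot",
--     "NEAR": "near",
--     "AVAX": "avalanche-2",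
--     "MATIC": "matic-network",
--     "BCH": "bitcoin-cash",
--     "ATOM": "cosmos",
--     "TRX": "tron",
--     "UNI": "uniswap",
--     "USDC": "usd-coin",
--     "USDT": "tether",
-- }
--
-- def resolve_symbol_to_id(symbol: str, coin_map: Dict[str, List[Dict[str, str]]]) -> Optional[str]:
--     """Resolve symbol to a single CoinGecko id using overrides and heuristics."""
--     s = symbol.upper()
--     if s in _MANUAL_OVERRIDES:
--         return _MANUAL_OVERRIDES[s]
--     candidates = coin_map.get(s)
--     if not candidates:
--         return None
--     if len(candidates) == 1:
--         return candidates[0]["id"]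
--     # prefer id == symbol.lower()
--     for c in candidates:
--         if c["id"].lower() == s.lower():
--             return c["id"]
--     # prefer name contains symbol
--     for c in candidates:
--         if s.lower() in (c.get("name") or "").lower().split():
--             return c["id"]
--     # fallback to first
--     return candidates[0]["id"]
-- ===== SOURCE B (Python) =====
-- from typing import Dict, List, Optional
--
-- _MANUAL_OVERRIDES = {
--     "BTC": "bitcoin",
--     "ETH": "ethereum",
--     "SOL": "solana",
--     "LINK": "chainlink",
--     "ALGO": "algorand",
--     "SUI": "sui",
--     "ADA": "cardano",
--     "DOGE": "dogecoin",
--     "XRP": "ripple",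
--     "LTC": "litecoin",
--     "DOT": "polkadot",
--     "NEAR": "near",
--     "AVAX": "avalanche-2",
--     "MATIC": "matic-network",
--     "BCH": "bitcoin-cash",
--     "ATOM": "cosmos",
--     "TRX": "tron",
--     "UNI": "uniswap",
--     "USDC": "usd-coin",
--     "USDT": "tether",
-- }
--
-- def resolve_symbol_to_id(symbol: str, coin_map: Dict[str, List[Dict[str, str]]]) -> Optional[str]:
--     """Resolve symbol to a single CoinGecko id using overrides and heuristics."""
--     s = symbol.upper()
--     if s in _MANUAL_OVERRIDES:
--         return _MANUAL_OVERRIDES[s]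
--     candidates = coin_map.get(s)
--     if not candidates:
--         return None
--     if len(candidates) == 1:
--         return candidates[0]["id"]
--     target = s.lower()
--     first_name_match = None
--     for c in candidates:
--         cid = c["id"]
--         if cid.lower() == target:
--             return cid
--         if first_name_match is None and target in (c.get("name") or "").lower().split():
--             first_name_match = cid
--     return first_name_match if first_name_match is not None else candidates[0]["id"]
-- ===== Notes on version B (the rewrite author's own statement) =====
-- stated objective: alternative
-- what changed: Replaces A's two sequential scans over the candidate list (exact-id pass, then name-word pass, then first-element fallback) by a single traversal that returns on the first exact id match and records the first name-word match as a no-overwrite fallback used only after the loop.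
-- outside the precondition, e.g. on resolve_symbol_to_id('ab', {'AB': [{'id': 'ab'}, {}]}): A returns 'ab', B returns 'ab'
import Mathlib
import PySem

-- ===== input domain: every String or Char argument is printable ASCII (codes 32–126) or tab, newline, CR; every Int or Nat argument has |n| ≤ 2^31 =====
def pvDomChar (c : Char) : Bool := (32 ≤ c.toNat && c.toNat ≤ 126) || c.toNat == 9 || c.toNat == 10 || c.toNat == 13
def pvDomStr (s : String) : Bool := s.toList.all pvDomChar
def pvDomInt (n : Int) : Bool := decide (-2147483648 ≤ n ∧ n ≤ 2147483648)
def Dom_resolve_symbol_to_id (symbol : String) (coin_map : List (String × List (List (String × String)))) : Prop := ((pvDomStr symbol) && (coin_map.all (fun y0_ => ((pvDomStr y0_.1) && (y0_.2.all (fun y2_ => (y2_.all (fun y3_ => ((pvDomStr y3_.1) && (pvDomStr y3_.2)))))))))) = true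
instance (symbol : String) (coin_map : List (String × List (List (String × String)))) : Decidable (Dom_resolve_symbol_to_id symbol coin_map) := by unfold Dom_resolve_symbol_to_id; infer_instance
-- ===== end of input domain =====

-- B replaces A's two sequential candidate scans by one traversal carrying a first-name-match
-- fallback (objective: alternative decomposition, same cost). Equality is about return values.

-- ===== PORT A =====
-- first-match association-list lookup = Python dict lookup on these literal-dict values
def pvLookup (d : List (String × String)) (k : String) : Option String :=
  (d.find? (fun p => p.1 == k)).map (·.2)

-- c["id"]; the default "" is never reached inside Pre_ (Python would raise KeyError there)
def pvGetId (c : List (String × String)) : String := (pvLookup c "id").getD ""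

-- (c.get("name") or "").lower().split()
def pvNameWords (c : List (String × String)) : List String :=
  PySem.Str.split₀ (PySem.Str.lower ((pvLookup c "name").getD ""))

def pvOverrides : List (String × String) :=
  [("BTC","bitcoin"),("ETH","ethereum"),("SOL","solana"),("LINK","chainlink"),
   ("ALGO","algorand"),("SUI","sui"),("ADA","cardano"),("DOGE","dogecoin"),
   ("XRP","ripple"),("LTC","litecoin"),("DOT","polkadot"),("NEAR","near"),
   ("AVAX","avalanche-2"),("MATIC","matic-network"),("BCH","bitcoin-cash"),
   ("ATOM","cosmos"),("TRX","tron"),("UNI","uniswap"),("USDC","usd-coin"),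
   ("USDT","tether")]

def resolve_symbol_to_id (symbol : String) (coin_map : List (String × List (List (String × String)))) : Option String :=
  let s := PySem.Str.upper symbol
  match pvLookup pvOverrides s with
  | some v => some v
  | none =>
    match (coin_map.find? (fun p => p.1 == s)).map (·.2) with
    | none => none
    | some cs =>
      if cs.isEmpty then none
      else if cs.length == 1 then some (pvGetId (cs.headD []))
      else
        -- for c in candidates: if c["id"].lower() == s.lower(): return c["id"]
        match cs.find? (fun c => PySem.Str.lower (pvGetId c) == PySem.Str.lower s) with
        | some c => some (pvGetId c)
        | none =>
          -- for c in candidates: if s.lower() in (c.get("name") or "").lower().split(): return c["id"]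
          match cs.find? (fun c => (pvNameWords c).contains (PySem.Str.lower s)) with
          | some c => some (pvGetId c)
          | none => some (pvGetId (cs.headD []))

-- ===== PORT B =====
-- the single loop of Source B: return on exact id match, record first name match, else fall through
def pvScan (target : String) (firstName : Option String) : List (List (String × String)) → Option String
  | [] => firstName
  | c :: rest =>
    let cid := pvGetId c
    if PySem.Str.lower cid == target then some cid
    else pvScan target (if firstName.isNone && (pvNameWords c).contains target then some cid else firstName) rest

def resolve_symbol_to_id_alt (symbol : String) (coin_map : List (String × List (List (String × String)))) : Option String :=
  let s := PySem.Str.upper symbol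
  match pvLookup pvOverrides s with
  | some v => some v
  | none =>
    match (coin_map.find? (fun p => p.1 == s)).map (·.2) with
    | none => none
    | some cs =>
      if cs.isEmpty then none
      else if cs.length == 1 then some (pvGetId (cs.headD []))
      else
        match pvScan (PySem.Str.lower s) none cs with
        | some r => some r
        | none => some (pvGetId (cs.headD []))

-- ===== PRECONDITION & SPEC =====
-- Pre_ excludes inputs where a scanned candidate dict lacks an "id" key: there Python A (and B)
-- raises KeyError; it requires every candidate under the looked-up key to carry "id", which also
-- excludes a few returning inputs where an exact match precedes an id-less candidate (see cites).
def Pre_resolve_symbol_to_id (symbol : String) (coin_map : List (String × List (List (String × String)))) : Prop :=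
  (let s := PySem.Str.upper symbol
   (pvLookup pvOverrides s).isSome ||
     (match (coin_map.find? (fun p => p.1 == s)).map (·.2) with
      | none => true
      | some cs => cs.all (fun c => (pvLookup c "id").isSome))) = true
instance (symbol : String) (coin_map : List (String × List (List (String × String)))) : Decidable (Pre_resolve_symbol_to_id symbol coin_map) := by unfold Pre_resolve_symbol_to_id; infer_instance

def pvWitness_resolve_symbol_to_id : String × (List (String × List (List (String × String)))) :=
  ("ab", [("AB", [[("id","ab")], [("id","x")]])])

def Spec_resolve_symbol_to_id (symbol : String) (coin_map : List (String × List (List (String × String)))) (out : Option String) : Prop := out = resolve_symbol_to_id_alt symbol coin_map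
instance (symbol : String) (coin_map : List (String × List (List (String × String)))) (out : Option String) : Decidable (Spec_resolve_symbol_to_id symbol coin_map out) := by unfold Spec_resolve_symbol_to_id; infer_instance

-- ===== CLAIM (what is proved, stated in full; the proofs are below) =====
def Claim_equal_resolve_symbol_to_id : Prop := ∀ (symbol : String) (coin_map : List (String × List (List (String × String)))), Dom_resolve_symbol_to_id symbol coin_map → Pre_resolve_symbol_to_id symbol coin_map → Spec_resolve_symbol_to_id symbol coin_map (resolve_symbol_to_id symbol coin_map)

-- ===== LEMMAS AND PROOFS =====
-- the single scan equals: first exact match, else the carried fallback, else the first name match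
theorem pvScan_eq (t : String) (fn : Option String) (cs : List (List (String × String))) :
    pvScan t fn cs =
      match cs.find? (fun c => PySem.Str.lower (pvGetId c) == t) with
      | some c => some (pvGetId c)
      | none =>
        match fn with
        | some x => some x
        | none => (cs.find? (fun c => (pvNameWords c).contains t)).map (fun c => pvGetId c) := by
  induction cs generalizing fn with
  | nil => cases fn <;> simp [pvScan]
  | cons c rest ih =>
    by_cases hex : (PySem.Str.lower (pvGetId c) == t) = true
    · simp [pvScan, List.find?, hex]
    · rw [Bool.not_eq_true] at hex
      cases fn with
      | some x => simp [pvScan, List.find?, hex, ih]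
      | none =>
        by_cases hnm : t ∈ pvNameWords c
        · simp [pvScan, List.find?, hex, hnm, ih]
        · simp [pvScan, List.find?, hex, hnm, ih]

-- ===== VERDICT (by name: the statement is the Claim_ definition above) =====
theorem resolve_symbol_to_id_spec : Claim_equal_resolve_symbol_to_id := by
  intro symbol coin_map _ _
  unfold Spec_resolve_symbol_to_id
  simp only [resolve_symbol_to_id, resolve_symbol_to_id_alt]
  cases h0 : pvLookup pvOverrides (PySem.Str.upper symbol) with
  | some v => rfl
  | none =>
    cases hcm : (coin_map.find? (fun p => p.1 == PySem.Str.upper symbol)).map (·.2) with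
    | none => rfl
    | some cs =>
      by_cases he : cs.isEmpty = true
      · simp [he]
      · by_cases h1 : (cs.length == 1) = true
        · simp [he, h1]
        · dsimp only
          rw [if_neg he, if_neg he, if_neg h1, if_neg h1, pvScan_eq]
          cases hf : cs.find? (fun c => PySem.Str.lower (pvGetId c) == PySem.Str.lower (PySem.Str.upper symbol)) with
          | some c => simp
          | none =>
            cases hg : cs.find? (fun c => (pvNameWords c).contains (PySem.Str.lower (PySem.Str.upper symbol))) with
            | some c => simp
            | none => simp
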